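-- pv_equiv track=rewrite | github.com/hypertacos520/Pokemon-Discord-Bot | Bot.py | pkmnNameEntryToName
-- ===== SOURCE A (Python) =====
-- def pkmnNameEntryToName(dataEntry):
--     newString = ""
--     capitalNumber = 0
--     for i in dataEntry:
--         if ord(i) < 91 and capitalNumber == 0:
--             capitalNumber = capitalNumber + 1
--             newString = newString + i
--         elif ord(i) < 91 and capitalNumber > 0 and capitalNumber < 2:
--             capitalNumber = capitalNumber + 1
--             newString = newString + ' (' + i
--         else:
--             newString = newString + i
--     if capitalNumber > 1:
--         newString = newString + ')'
--     return newString
-- ===== SOURCE B (Python) =====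
-- def pkmnNameEntryToName(dataEntry):
--     idxs = [k for k, c in enumerate(dataEntry) if ord(c) < 91]
--     if len(idxs) < 2:
--         return dataEntry
--     i = idxs[1]
--     return dataEntry[:i] + ' (' + dataEntry[i:] + ')'
-- ===== Notes on version B (the rewrite author's own statement) =====
-- stated objective: simpler
-- what changed: Replaces the running-capital-count character-by-character concatenation with locating the indices of ord(c)<91 characters via one enumerate comprehension and assembling the result from two slices around the second such index.
import Mathlib
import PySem

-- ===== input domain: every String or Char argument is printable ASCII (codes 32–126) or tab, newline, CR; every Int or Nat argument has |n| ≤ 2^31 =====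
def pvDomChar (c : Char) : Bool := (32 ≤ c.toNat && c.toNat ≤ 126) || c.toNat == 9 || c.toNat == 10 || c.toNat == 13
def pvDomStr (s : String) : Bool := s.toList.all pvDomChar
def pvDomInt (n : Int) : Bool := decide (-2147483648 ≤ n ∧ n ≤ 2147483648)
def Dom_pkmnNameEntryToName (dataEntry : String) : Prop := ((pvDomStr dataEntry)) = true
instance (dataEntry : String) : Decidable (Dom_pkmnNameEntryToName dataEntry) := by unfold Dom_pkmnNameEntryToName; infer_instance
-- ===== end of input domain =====

-- B locates the second ord(c) < 91 character by index and splices the parentheses in with slices,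
-- instead of A's running-count concatenation loop; objective: simpler.

-- ===== PORT A =====
-- loop body of A: state = (newString as List Char, capitalNumber : Int)
def pvStepA (st : List Char × Int) (i : Char) : List Char × Int :=
  if i.toNat < 91 ∧ st.2 = 0 then (st.1 ++ [i], st.2 + 1)
  else if i.toNat < 91 ∧ st.2 > 0 ∧ st.2 < 2 then (st.1 ++ [' ', '(', i], st.2 + 1)
  else (st.1 ++ [i], st.2)

def pkmnNameEntryToName (dataEntry : String) : String :=
  let r := dataEntry.toList.foldl pvStepA ([], 0)
  if r.2 > 1 then String.ofList (r.1 ++ [')']) else String.ofList r.1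

-- ===== PORT B =====
-- transcription of the comprehension [k for k, c in enumerate(dataEntry) if ord(c) < 91]
def pvCapIdxs (k : Nat) : List Char → List Nat
  | [] => []
  | c :: cs => if c.toNat < 91 then k :: pvCapIdxs (k + 1) cs else pvCapIdxs (k + 1) cs

def pkmnNameEntryToName_alt (dataEntry : String) : String :=
  let cs := dataEntry.toList
  match pvCapIdxs 0 cs with
  | _ :: i :: _ => String.ofList (cs.take i ++ [' ', '('] ++ cs.drop i ++ [')'])
  | _ => dataEntry

-- ===== PRECONDITION & SPEC =====
def Spec_pkmnNameEntryToName (dataEntry : String) (out : String) : Prop := out = pkmnNameEntryToName_alt dataEntry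
instance (dataEntry : String) (out : String) : Decidable (Spec_pkmnNameEntryToName dataEntry out) := by unfold Spec_pkmnNameEntryToName; infer_instance

-- ===== CLAIM (what is proved, stated in full; the proofs are below) =====
def Claim_equal_pkmnNameEntryToName : Prop := ∀ (dataEntry : String), Dom_pkmnNameEntryToName dataEntry → Spec_pkmnNameEntryToName dataEntry (pkmnNameEntryToName dataEntry)

-- ===== LEMMAS AND PROOFS =====

lemma pvCapIdxs_succ (k : Nat) (cs : List Char) :
    pvCapIdxs (k + 1) cs = (pvCapIdxs k cs).map (· + 1) := by
  induction cs generalizing k with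
  | nil => simp [pvCapIdxs]
  | cons c cs ih =>
    simp only [pvCapIdxs]
    split <;> simp [ih, Nat.add_comm, Nat.add_left_comm]

-- with capitalNumber already 2, every later char takes the else branch
lemma pvFoldA_two (cs : List Char) (acc : List Char) :
    cs.foldl pvStepA (acc, 2) = (acc ++ cs, 2) := by
  induction cs generalizing acc with
  | nil => simp
  | cons c cs ih => simp [pvStepA, ih]

-- with capitalNumber 1, the next ord<91 char gets ' (' inserted before it
lemma pvFoldA_one (cs : List Char) (acc : List Char) :
    cs.foldl pvStepA (acc, 1) =
      match pvCapIdxs 0 cs with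
      | [] => (acc ++ cs, 1)
      | i :: _ => (acc ++ cs.take i ++ [' ', '('] ++ cs.drop i, 2) := by
  induction cs generalizing acc with
  | nil => simp [pvCapIdxs]
  | cons c cs ih =>
    by_cases hc : c.toNat < 91
    · simp [pvCapIdxs, hc, pvStepA, pvFoldA_two]
    · simp only [pvCapIdxs, hc, if_false, List.foldl_cons, pvStepA, false_and,
        if_neg (by simp [hc] : ¬(c.toNat < 91 ∧ (1:Int) = 0)),
        if_neg (by simp [hc] : ¬(c.toNat < 91 ∧ (1:Int) > 0 ∧ (1:Int) < 2))]
      rw [ih, pvCapIdxs_succ]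
      cases pvCapIdxs 0 cs <;> simp

-- full characterisation of A's loop from the initial state
lemma pvFoldA_zero (cs : List Char) (acc : List Char) :
    cs.foldl pvStepA (acc, 0) =
      match pvCapIdxs 0 cs with
      | [] => (acc ++ cs, 0)
      | [_] => (acc ++ cs, 1)
      | _ :: j :: _ => (acc ++ cs.take j ++ [' ', '('] ++ cs.drop j, 2) := by
  induction cs generalizing acc with
  | nil => simp [pvCapIdxs]
  | cons c cs ih =>
    by_cases hc : c.toNat < 91
    · simp only [pvCapIdxs, hc, if_true, List.foldl_cons, pvStepA, and_self, zero_add]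
      rw [pvFoldA_one, pvCapIdxs_succ]
      cases pvCapIdxs 0 cs <;> simp
    · simp only [pvCapIdxs, hc, if_false, List.foldl_cons, pvStepA, false_and,
        if_neg (by simp [hc] : ¬(c.toNat < 91 ∧ (0:Int) = 0)),
        if_neg (by simp [hc] : ¬(c.toNat < 91 ∧ (0:Int) > 0 ∧ (0:Int) < 2))]
      rw [ih, pvCapIdxs_succ]
      cases pvCapIdxs 0 cs with
      | nil => simp
      | cons i t => cases t <;> simp

-- ===== VERDICT (by name: the statement is the Claim_ definition above) =====
theorem pkmnNameEntryToName_spec : Claim_equal_pkmnNameEntryToName := by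
  intro s _
  unfold Spec_pkmnNameEntryToName pkmnNameEntryToName pkmnNameEntryToName_alt
  rw [pvFoldA_zero]
  cases h : pvCapIdxs 0 s.toList with
  | nil => simp [h]
  | cons i t =>
    cases t with
    | nil => simp [h]
    | cons j t => simp [h, List.append_assoc]
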